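-- pv_equiv track=rewrite | github.com/3veryDay/Growing | ProgrammersLv2/롤케이크 자르기.py | solution
-- ===== SOURCE A (Python) =====
-- from collections import Counter, defaultdict
--
-- def solution(topping) :
--     bro = dict(Counter(topping))
--     sis = defaultdict(int)
--     cnt = 0
--     for top in topping :
--         bro[top] -= 1
--         if bro[top] == 0 :
--             bro.pop(top)
--         sis[top] += 1
--
--         if len(bro) == len(sis) :
--             cnt += 1
--
--     return cnt
-- ===== SOURCE B (Python) =====
-- def solution(topping):
--     # backward pass: suffix[i] = number of distinct toppings in topping[i:]
--     n = len(topping)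
--     suffix = [0] * (n + 1)
--     seen = set()
--     for i in range(n - 1, -1, -1):
--         seen.add(topping[i])
--         suffix[i] = len(seen)
--     # forward pass: grow the left set, compare against the precomputed suffix counts
--     left = set()
--     cnt = 0
--     for i in range(n):
--         left.add(topping[i])
--         if len(left) == suffix[i + 1]:
--             cnt += 1
--     return cnt
-- ===== Notes on version B (the rewrite author's own statement) =====
-- stated objective: alternative
-- what changed: Replaces A's single pass that decrements a precomputed Counter and grows a defaultdict with two differently-shaped passes: a backward pass precomputing a suffix table of distinct-topping counts with a set, then a forward pass growing a left set and comparing its size against the table.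
import Mathlib
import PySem

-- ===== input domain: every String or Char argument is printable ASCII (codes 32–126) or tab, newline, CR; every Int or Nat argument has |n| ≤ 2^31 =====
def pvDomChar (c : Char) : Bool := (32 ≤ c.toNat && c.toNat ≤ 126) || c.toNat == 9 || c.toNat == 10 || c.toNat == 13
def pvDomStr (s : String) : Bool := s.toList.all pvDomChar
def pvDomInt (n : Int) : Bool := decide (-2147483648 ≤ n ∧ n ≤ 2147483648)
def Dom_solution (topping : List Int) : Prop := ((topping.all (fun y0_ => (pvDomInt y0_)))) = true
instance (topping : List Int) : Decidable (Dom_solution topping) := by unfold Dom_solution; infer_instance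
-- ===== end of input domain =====

-- B replaces A's single Counter-decrementing pass by a backward suffix-distinct-count pass plus a
-- forward set-growing pass (alternative decomposition, same cost; return values proved equal).

-- ===== PORT A =====
-- A's loop: bro = Counter(topping) is decremented (popping keys at 0), sis (defaultdict(int))
-- is incremented, and steps with len(bro) == len(sis) are counted.
-- `bro[top] -= 1` is ported with default 0; the key is always present there (bro[top] counts the
-- occurrences of top in the unconsumed part, ≥ 1 at that access), so the default is never used.
def solutionLoop : List Int → PySem.Dict Int Int → PySem.Dict Int Int → Int → Int
  | [], _bro, _sis, cnt => cnt
  | top :: rest, bro, sis, cnt =>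
    let bro1 := bro.modify top 0 (fun v => v - 1)
    let bro2 := if bro1.getD top 0 = 0 then bro1.erase top else bro1
    let sis1 := sis.modify top 0 (fun v => v + 1)
    solutionLoop rest bro2 sis1 (if bro2.items.length = sis1.items.length then cnt + 1 else cnt)

def solution (topping : List Int) : Int :=
  solutionLoop topping (PySem.Dict.counter topping) PySem.Dict.empty 0

-- ===== PORT B =====
-- backward pass of Source B: walk right-to-left adding each topping to `seen` and prepending
-- len(seen); returns (seen, suffix table), with the trailing 0 for the empty right half
def suffixCounts : List Int → PySem.Set Int × List Int
  | [] => (PySem.Set.empty, [0])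
  | x :: xs =>
    let p := suffixCounts xs
    let seen := p.1.add x
    (seen, seen.len :: p.2)

-- forward pass of Source B, over the pairs (topping[i], suffix[i+1])
def forwardLoop : List (Int × Int) → PySem.Set Int → Int → Int
  | [], _left, cnt => cnt
  | (x, s) :: rest, left, cnt =>
    let left1 := left.add x
    forwardLoop rest left1 (if left1.len = s then cnt + 1 else cnt)

def solution_alt (topping : List Int) : Int :=
  forwardLoop (topping.zip (suffixCounts topping).2.tail) PySem.Set.empty 0

-- ===== PRECONDITION & SPEC =====
def Spec_solution (topping : List Int) (out : Int) : Prop := out = solution_alt topping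
instance (topping : List Int) (out : Int) : Decidable (Spec_solution topping out) := by unfold Spec_solution; infer_instance

-- ===== CLAIM (what is proved, stated in full; the proofs are below) =====
def Claim_equal_solution : Prop := ∀ (topping : List Int), Dom_solution topping → Spec_solution topping (solution topping)

-- ===== LEMMAS AND PROOFS =====

lemma pv_contains_iff (d : PySem.Dict Int Int) (k : Int) :
    d.contains k = true ↔ k ∈ d.keys := by
  simp [PySem.Dict.contains, PySem.Dict.keys, List.any_eq_true]

lemma pv_items_len (d : PySem.Dict Int Int) : d.items.length = d.keys.length := by
  simp [PySem.Dict.keys]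

lemma pv_keys_insert_of_mem (d : PySem.Dict Int Int) (k v : Int) (h : k ∈ d.keys) :
    (d.insert k v).keys = d.keys := by
  have hc : d.contains k = true := (pv_contains_iff d k).2 h
  simp only [PySem.Dict.insert, hc, if_true, PySem.Dict.keys, List.map_map]
  refine List.map_congr_left ?_
  intro p _
  by_cases hpk : p.1 = k <;> simp [Function.comp, hpk]

lemma pv_keys_insert_of_not_mem (d : PySem.Dict Int Int) (k v : Int) (h : k ∉ d.keys) :
    (d.insert k v).keys = d.keys ++ [k] := by
  have hc : ¬ d.contains k = true := fun hh => h ((pv_contains_iff d k).1 hh)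
  simp [PySem.Dict.insert, hc, PySem.Dict.keys]

lemma pv_getD_erase (d : PySem.Dict Int Int) (k k' d0 : Int) :
    (d.erase k).getD k' d0 = if k' = k then d0 else d.getD k' d0 := by
  by_cases h : k' = k
  · subst h
    simp only [PySem.Dict.erase, PySem.Dict.getD, PySem.Dict.get?, if_pos rfl]
    have hnone : List.find? (fun p : Int × Int => p.1 == k')
        (List.filter (fun p : Int × Int => !(p.1 == k')) d.items) = none := by
      rw [List.find?_eq_none]
      intro p hp
      have h2 := (List.mem_filter.mp hp).2
      simp at h2 ⊢
      exact h2
    rw [hnone]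
    simp
  · simp only [PySem.Dict.erase, PySem.Dict.getD, PySem.Dict.get?, if_neg h]
    rw [List.find?_filter]
    have hfun : (fun a : Int × Int => decide ((!(a.1 == k)) = true ∧ (a.1 == k') = true))
        = (fun p : Int × Int => p.1 == k') := by
      funext p
      by_cases hp : p.1 = k' <;> simp [hp, h]
    rw [hfun]


lemma pv_mem_keys_erase (d : PySem.Dict Int Int) (k k' : Int) :
    k' ∈ (d.erase k).keys ↔ k' ∈ d.keys ∧ k' ≠ k := by
  simp [PySem.Dict.erase, PySem.Dict.keys, List.mem_filter]

lemma pv_keys_erase_nodup (d : PySem.Dict Int Int) (k : Int) (h : d.keys.Nodup) :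
    (d.erase k).keys.Nodup := by
  simp only [PySem.Dict.keys] at *
  refine List.Nodup.sublist (List.Sublist.map _ ?_) h
  simp only [PySem.Dict.erase]
  exact List.filter_sublist

lemma pv_set_add_of_mem (s : PySem.Set Int) (x : Int) (h : x ∈ s) : s.add x = s := by
  simp [PySem.Set.add, List.contains_iff_mem, h]

lemma pv_set_add_of_not_mem (s : PySem.Set Int) (x : Int) (h : x ∉ s) : s.add x = s ++ [x] := by
  simp [PySem.Set.add, List.contains_iff_mem, h]

lemma pv_nodup_append_one {l : List Int} {x : Int} (h : l.Nodup) (hx : x ∉ l) :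
    (l ++ [x]).Nodup := by
  simp [List.nodup_append, h]
  intro a ha hax
  subst hax
  exact hx ha

lemma pv_length_eq_of_mem_iff {l1 l2 : List Int} (h1 : l1.Nodup) (h2 : l2.Nodup)
    (h : ∀ k, k ∈ l1 ↔ k ∈ l2) : l1.length = l2.length := by
  rw [← List.toFinset_card_of_nodup h1, ← List.toFinset_card_of_nodup h2]
  congr 1
  ext a
  simp [List.mem_toFinset, h a]

lemma pv_counter_fold (ys : List Int) : ∀ (d : PySem.Dict Int Int), d.keys.Nodup →
    (List.foldl (fun d x => d.modify x 0 fun v => v + 1) d ys).keys.Nodup ∧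
    ∀ k, k ∈ (List.foldl (fun d x => d.modify x 0 fun v => v + 1) d ys).keys ↔ (k ∈ d.keys ∨ k ∈ ys) := by
  induction ys with
  | nil =>
    intro d hd
    simp only [List.foldl_nil]
    exact ⟨hd, fun k => by simp⟩
  | cons y ys ih =>
    intro d hd
    simp only [List.foldl_cons]
    by_cases hy : y ∈ d.keys
    · have hk : (d.modify y 0 (fun v => v + 1)).keys = d.keys := by
        simp only [PySem.Dict.modify]
        exact pv_keys_insert_of_mem d y _ hy
      obtain ⟨hn, hm⟩ := ih (d.modify y 0 (fun v => v + 1)) (by rw [hk]; exact hd)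
      refine ⟨hn, fun k => ?_⟩
      rw [hm k, hk]
      constructor
      · rintro (h | h)
        · exact Or.inl h
        · exact Or.inr (List.mem_cons_of_mem _ h)
      · rintro (h | h)
        · exact Or.inl h
        · rcases List.mem_cons.mp h with rfl | h
          · exact Or.inl hy
          · exact Or.inr h
    · have hk : (d.modify y 0 (fun v => v + 1)).keys = d.keys ++ [y] := by
        simp only [PySem.Dict.modify]
        exact pv_keys_insert_of_not_mem d y _ hy
      obtain ⟨hn, hm⟩ := ih (d.modify y 0 (fun v => v + 1))
        (by rw [hk]; exact pv_nodup_append_one hd hy)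
      refine ⟨hn, fun k => ?_⟩
      rw [hm k, hk]
      simp only [List.mem_append, List.mem_cons, List.mem_singleton]
      tauto

lemma pv_suffix_spec (l : List Int) :
    List.Nodup (suffixCounts l).1 ∧ (∀ k, k ∈ (suffixCounts l).1 ↔ k ∈ l) ∧
    (suffixCounts l).2 = PySem.Set.len (suffixCounts l).1 :: (suffixCounts l).2.tail := by
  induction l with
  | nil =>
    refine ⟨by simp [suffixCounts, PySem.Set.empty], fun k => by simp [suffixCounts, PySem.Set.empty], ?_⟩
    simp [suffixCounts, PySem.Set.len, PySem.Set.empty]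
  | cons x xs ih =>
    obtain ⟨hn, hm, _⟩ := ih
    refine ⟨?_, fun k => ?_, rfl⟩
    · show List.Nodup ((suffixCounts xs).1.add x)
      by_cases hx : x ∈ (suffixCounts xs).1
      · rw [pv_set_add_of_mem _ _ hx]; exact hn
      · rw [pv_set_add_of_not_mem _ _ hx]; exact pv_nodup_append_one hn hx
    · show k ∈ (suffixCounts xs).1.add x ↔ _
      rw [PySem.Set.mem_add, hm k]
      simp only [List.mem_cons]
      tauto

-- one step of the simultaneous induction (the sis/left facts are supplied by the caller)
lemma pv_step (x : Int) (xs : List Int)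
    (ih : ∀ (bro sis : PySem.Dict Int Int) (left : PySem.Set Int) (cnt : Int),
      bro.keys.Nodup → (∀ k, bro.getD k 0 = (List.count k xs : Int)) → (∀ k, k ∈ bro.keys ↔ k ∈ xs) →
      sis.keys.Nodup → List.Nodup left → (∀ k, k ∈ sis.keys ↔ k ∈ left) →
      solutionLoop xs bro sis cnt = forwardLoop (xs.zip (suffixCounts xs).2.tail) left cnt)
    (bro sis : PySem.Dict Int Int) (left : PySem.Set Int) (cnt : Int)
    (hbn : bro.keys.Nodup)
    (hbg : ∀ k, bro.getD k 0 = (List.count k (x :: xs) : Int))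
    (hbm : ∀ k, k ∈ bro.keys ↔ k ∈ (x :: xs))
    (hs1n : (sis.modify x 0 (fun v => v + 1)).keys.Nodup)
    (hl1n : List.Nodup (left.add x))
    (hs1m : ∀ k, k ∈ (sis.modify x 0 (fun v => v + 1)).keys ↔ k ∈ left.add x) :
    solutionLoop (x :: xs) bro sis cnt = forwardLoop ((x :: xs).zip (suffixCounts (x :: xs)).2.tail) left cnt := by
  have hzt : (suffixCounts (x :: xs)).2.tail = (suffixCounts xs).2 := by
    simp [suffixCounts]
  have hzip : (x :: xs).zip ((suffixCounts (x :: xs)).2.tail)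
      = (x, PySem.Set.len (suffixCounts xs).1) :: xs.zip ((suffixCounts xs).2.tail) := by
    rw [hzt]
    conv_lhs => rw [(pv_suffix_spec xs).2.2]
    rw [List.zip_cons_cons]
  have hval : (List.count x (x :: xs) : Int) - 1 = (List.count x xs : Int) := by
    rw [List.count_cons_self]; push_cast; ring
  have hmod : bro.modify x 0 (fun v => v - 1) = bro.insert x ((List.count x xs : Int)) := by
    simp only [PySem.Dict.modify]
    rw [hbg x, hval]
  have hg1 : ∀ k, (bro.insert x ((List.count x xs : Int))).getD k 0
      = if k = x then (List.count x xs : Int) else (List.count k (x :: xs) : Int) := by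
    intro k
    rw [PySem.Dict.getD_insert]
    by_cases hk : k = x <;> simp [hk, hbg k]
  have hkeys1 : (bro.insert x ((List.count x xs : Int))).keys = bro.keys :=
    pv_keys_insert_of_mem bro x _ ((hbm x).2 List.mem_cons_self)
  have hscn := (pv_suffix_spec xs).1
  have hscm := (pv_suffix_spec xs).2.1
  have e2 : (sis.modify x 0 (fun v => v + 1)).keys.length = (left.add x).length :=
    pv_length_eq_of_mem_iff hs1n hl1n hs1m
  by_cases hx0 : List.count x xs = 0
  · -- x does not occur later: A pops the key, the suffix set shrinks by one
    have hxnot : x ∉ xs := List.count_eq_zero.mp hx0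
    have hcond : (bro.insert x ((List.count x xs : Int))).getD x 0 = 0 := by
      simp [hg1 x, hx0]
    have hb2n : ((bro.insert x ((List.count x xs : Int))).erase x).keys.Nodup :=
      pv_keys_erase_nodup _ _ (hkeys1 ▸ hbn)
    have hb2g : ∀ k, ((bro.insert x ((List.count x xs : Int))).erase x).getD k 0 = (List.count k xs : Int) := by
      intro k
      rw [pv_getD_erase]
      by_cases hk : k = x
      · simp [hk, hx0]
      · rw [if_neg hk, hg1 k, if_neg hk]
        have hk' : ¬ x = k := fun hh => hk hh.symm
        simp [List.count_cons, hk, hk']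
    have hb2m : ∀ k, k ∈ ((bro.insert x ((List.count x xs : Int))).erase x).keys ↔ k ∈ xs := by
      intro k
      rw [pv_mem_keys_erase, hkeys1, hbm k]
      simp only [List.mem_cons]
      constructor
      · rintro ⟨(rfl | h), hne⟩
        · exact absurd rfl hne
        · exact h
      · intro h
        exact ⟨Or.inr h, fun hkx => hxnot (hkx ▸ h)⟩
    have e1 : ((bro.insert x ((List.count x xs : Int))).erase x).keys.length = (suffixCounts xs).1.length :=
      pv_length_eq_of_mem_iff hb2n hscn (fun k => (hb2m k).trans ((hscm k).symm))
    have hiff : (((bro.insert x ((List.count x xs : Int))).erase x).items.length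
          = (sis.modify x 0 (fun v => v + 1)).items.length)
        ↔ (PySem.Set.len (left.add x) = PySem.Set.len (suffixCounts xs).1) := by
      rw [pv_items_len, pv_items_len, e1, e2]
      simp only [PySem.Set.len]
      omega
    rw [hzip]
    simp only [solutionLoop, forwardLoop]
    rw [hmod, if_pos hcond, if_congr hiff rfl rfl]
    exact ih _ _ _ _ hb2n hb2g hb2m hs1n hl1n hs1m
  · -- x occurs again later: the key stays, the suffix set is unchanged
    have hxin : x ∈ xs := List.count_pos_iff.mp (Nat.pos_of_ne_zero hx0)
    have hcond : ¬ (bro.insert x ((List.count x xs : Int))).getD x 0 = 0 := by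
      rw [hg1 x, if_pos rfl]
      exact_mod_cast hx0
    have hb2n : (bro.insert x ((List.count x xs : Int))).keys.Nodup := hkeys1 ▸ hbn
    have hb2g : ∀ k, (bro.insert x ((List.count x xs : Int))).getD k 0 = (List.count k xs : Int) := by
      intro k
      rw [hg1 k]
      by_cases hk : k = x
      · rw [if_pos hk, hk]
      · rw [if_neg hk]
        have hk' : ¬ x = k := fun hh => hk hh.symm
        simp [List.count_cons, hk, hk']
    have hb2m : ∀ k, k ∈ (bro.insert x ((List.count x xs : Int))).keys ↔ k ∈ xs := by
      intro k
      rw [hkeys1, hbm k]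
      simp only [List.mem_cons]
      constructor
      · rintro (rfl | h)
        · exact hxin
        · exact h
      · exact Or.inr
    have e1 : (bro.insert x ((List.count x xs : Int))).keys.length = (suffixCounts xs).1.length :=
      pv_length_eq_of_mem_iff hb2n hscn (fun k => (hb2m k).trans ((hscm k).symm))
    have hiff : ((bro.insert x ((List.count x xs : Int))).items.length
          = (sis.modify x 0 (fun v => v + 1)).items.length)
        ↔ (PySem.Set.len (left.add x) = PySem.Set.len (suffixCounts xs).1) := by
      rw [pv_items_len, pv_items_len, e1, e2]
      simp only [PySem.Set.len]
      omega
    rw [hzip]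
    simp only [solutionLoop, forwardLoop]
    rw [hmod, if_neg hcond, if_congr hiff rfl rfl]
    exact ih _ _ _ _ hb2n hb2g hb2m hs1n hl1n hs1m

-- the main simultaneous induction: A's loop state (bro, sis) tracked against B's left set
lemma pv_main (rest : List Int) : ∀ (bro sis : PySem.Dict Int Int) (left : PySem.Set Int) (cnt : Int),
    bro.keys.Nodup → (∀ k, bro.getD k 0 = (List.count k rest : Int)) → (∀ k, k ∈ bro.keys ↔ k ∈ rest) →
    sis.keys.Nodup → List.Nodup left → (∀ k, k ∈ sis.keys ↔ k ∈ left) →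
    solutionLoop rest bro sis cnt = forwardLoop (rest.zip (suffixCounts rest).2.tail) left cnt := by
  induction rest with
  | nil =>
    intro bro sis left cnt _ _ _ _ _ _
    simp [solutionLoop, forwardLoop]
  | cons x xs ih =>
    intro bro sis left cnt hbn hbg hbm hsn hln hsm
    have hsis : sis.modify x 0 (fun v => v + 1) = sis.insert x (sis.getD x 0 + 1) := rfl
    by_cases hxs : x ∈ sis.keys
    · have hxleft : x ∈ left := (hsm x).1 hxs
      have hkeyss : (sis.modify x 0 (fun v => v + 1)).keys = sis.keys := by
        rw [hsis]; exact pv_keys_insert_of_mem sis x _ hxs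
      have hladd : left.add x = left := pv_set_add_of_mem left x hxleft
      exact pv_step x xs ih bro sis left cnt hbn hbg hbm
        (by rw [hkeyss]; exact hsn)
        (by rw [hladd]; exact hln)
        (fun k => by rw [hkeyss, hladd]; exact hsm k)
    · have hxleft : x ∉ left := fun h => hxs ((hsm x).2 h)
      have hkeyss : (sis.modify x 0 (fun v => v + 1)).keys = sis.keys ++ [x] := by
        rw [hsis]; exact pv_keys_insert_of_not_mem sis x _ hxs
      have hladd : left.add x = left ++ [x] := pv_set_add_of_not_mem left x hxleft
      exact pv_step x xs ih bro sis left cnt hbn hbg hbm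
        (by rw [hkeyss]; exact pv_nodup_append_one hsn hxs)
        (by rw [hladd]; exact pv_nodup_append_one hln hxleft)
        (fun k => by
          rw [hkeyss, hladd]
          simp only [List.mem_append, List.mem_singleton]
          exact or_congr (hsm k) Iff.rfl)

-- ===== VERDICT (by name: the statement is the Claim_ definition above) =====
theorem solution_spec : Claim_equal_solution := by
  intro topping _
  unfold Spec_solution solution solution_alt
  obtain ⟨hn, hm⟩ := pv_counter_fold topping PySem.Dict.empty
    (by simp [PySem.Dict.empty, PySem.Dict.keys])
  refine pv_main topping _ _ _ _ ?_ ?_ ?_ ?_ ?_ ?_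
  · exact hn
  · intro k; exact PySem.Dict.getD_counter topping k
  · intro k
    refine (hm k).trans ?_
    simp [PySem.Dict.empty, PySem.Dict.keys]
  · simp [PySem.Dict.empty, PySem.Dict.keys]
  · simp [PySem.Set.empty]
  · intro k
    simp [PySem.Dict.empty, PySem.Dict.keys, PySem.Set.empty]
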